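-- pv_equiv track=rewrite | github.com/Hallyson34/uPython2 | verificar_linha_nula.py | verificarColunas
-- ===== SOURCE A (Python) =====
-- def verificarColunas(A,n):
--     c = 0
--     for j in range(n):
--         soma = 0
--         for i in range(len(A)):
--             soma += A[i][j]
--         if soma == 0:
--             c += 1
--     return c
-- ===== SOURCE B (Python) =====
-- def verificarColunas(A, n):
--     sums = [0] * n
--     for i in range(len(A)):
--         row = A[i]
--         for j in range(n):
--             sums[j] += row[j]
--     return sums.count(0)
-- ===== Notes on version B (the rewrite author's own statement) =====
-- stated objective: alternative
-- what changed: Replaces A's column-major double loop (re-scanning all rows once per column) by a single row-major accumulation into a sums array followed by a separate count of zero entries (transposed traversal, accumulate phase then count phase).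
import Mathlib
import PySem

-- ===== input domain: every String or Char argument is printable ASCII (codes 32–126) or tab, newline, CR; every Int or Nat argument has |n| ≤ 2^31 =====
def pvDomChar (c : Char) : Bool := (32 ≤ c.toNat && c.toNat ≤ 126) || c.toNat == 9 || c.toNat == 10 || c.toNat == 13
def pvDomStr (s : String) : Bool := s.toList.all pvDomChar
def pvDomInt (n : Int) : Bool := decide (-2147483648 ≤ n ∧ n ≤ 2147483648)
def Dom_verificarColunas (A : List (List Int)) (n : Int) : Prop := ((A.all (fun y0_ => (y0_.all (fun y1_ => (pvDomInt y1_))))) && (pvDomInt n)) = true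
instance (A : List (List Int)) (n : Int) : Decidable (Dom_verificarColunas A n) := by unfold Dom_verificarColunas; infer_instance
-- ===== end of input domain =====

-- B replaces A's column-major double loop by one row-major accumulation pass into a sums
-- array followed by a separate count of zero entries (same asymptotic cost, different traversal).

-- ===== PORT A =====
def verificarColunas (A : List (List Int)) (n : Int) : Int :=
  (PySem.List.pyRange 0 n 1).foldl (fun c j =>
    let soma := (PySem.List.pyRange 0 (A.length : Int) 1).foldl
      (fun soma i => soma + PySem.List.pyGetD (PySem.List.pyGetD A i []) j 0) 0
    if soma = 0 then c + 1 else c) 0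

-- ===== PORT B =====
-- sums[j] += row[j] is ported with pySetD/pyGetD (exact for the 0 ≤ j < n indices produced
-- by range(n) under Pre_); [0]*n is List.replicate n.toNat 0 (Python's * clamps n < 0 to []).
def verificarColunas_alt (A : List (List Int)) (n : Int) : Int :=
  let sums0 : List Int := List.replicate n.toNat 0
  let sums := (PySem.List.pyRange 0 (A.length : Int) 1).foldl (fun sums i =>
    let row := PySem.List.pyGetD A i []
    (PySem.List.pyRange 0 n 1).foldl (fun s j =>
      PySem.List.pySetD s j (PySem.List.pyGetD s j 0 + PySem.List.pyGetD row j 0)) sums) sums0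
  PySem.List.count sums 0

-- ===== PRECONDITION & SPEC =====
-- Pre_ excludes exactly the inputs where both Pythons raise IndexError: some row shorter than n.
def Pre_verificarColunas (A : List (List Int)) (n : Int) : Prop :=
  n ≤ 0 ∨ ∀ r ∈ A, n ≤ (r.length : Int)
instance (A : List (List Int)) (n : Int) : Decidable (Pre_verificarColunas A n) := by
  unfold Pre_verificarColunas; infer_instance

def pvWitness_verificarColunas : List (List Int) × Int := ([[1, -1], [-1, 1]], 2)

def Spec_verificarColunas (A : List (List Int)) (n : Int) (out : Int) : Prop := out = verificarColunas_alt A n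
instance (A : List (List Int)) (n : Int) (out : Int) : Decidable (Spec_verificarColunas A n out) := by unfold Spec_verificarColunas; infer_instance

-- ===== CLAIM (what is proved, stated in full; the proofs are below) =====
def Claim_equal_verificarColunas : Prop := ∀ (A : List (List Int)) (n : Int), Dom_verificarColunas A n → Pre_verificarColunas A n → Spec_verificarColunas A n (verificarColunas A n)

-- ===== LEMMAS AND PROOFS =====

-- column sum of the rows, at Int index j (0 ≤ j)
def pvColSum (rows : List (List Int)) (j : Int) : Int :=
  (rows.map (fun r => PySem.List.pyGetD r j 0)).sum

theorem pv_inner_fold (r : List Int) :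
    ∀ (d : Nat) (a : Int) (s : List Int), 0 ≤ a → a + d ≤ (s.length : Int) →
    ∃ res, (PySem.List.pyRange a (a + d) 1).foldl
        (fun s j => PySem.List.pySetD s j (PySem.List.pyGetD s j 0 + PySem.List.pyGetD r j 0)) s
        = res ∧ res.length = s.length ∧
      ∀ k, k < s.length →
        res.getD k 0 = if a ≤ (k : Int) ∧ (k : Int) < a + d
          then s.getD k 0 + PySem.List.pyGetD r (k : Int) 0 else s.getD k 0 := by
  intro d
  induction d with
  | zero =>
    intro a s ha hlen
    refine ⟨s, ?_, rfl, ?_⟩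
    · simp
    · intro k hk
      have hno : ¬ (a ≤ (k : Int) ∧ (k : Int) < a + ((0:Nat) : Int)) := by push_cast; omega
      rw [if_neg hno]
  | succ d ih =>
    intro a s ha hlen
    have hlt : a < a + ((d+1 : Nat) : Int) := by push_cast; omega
    have hatoNat : ((a.toNat : Int)) = a := by omega
    set v := PySem.List.pyGetD s a 0 + PySem.List.pyGetD r a 0 with hv
    have hset : PySem.List.pySetD s a v = s.set a.toNat v :=
      PySem.List.pySetD_of_nonneg s v ha
    have hlen' : (s.set a.toNat v).length = s.length := by simp
    obtain ⟨res, hres, hreslen, hresget⟩ :=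
      ih (a + 1) (s.set a.toNat v) (by omega) (by push_cast at hlen ⊢; omega)
    refine ⟨res, ?_, by omega, ?_⟩
    · rw [PySem.List.pyRange_one_cons hlt]
      have hb : a + ((d+1 : Nat) : Int) = (a + 1) + ((d : Nat) : Int) := by push_cast; ring
      simp only [List.foldl_cons, hb, ← hv, hset, hres]
    · intro k hk
      have hk' : k < (s.set a.toNat v).length := by omega
      have := hresget k (by omega)
      rw [this]
      by_cases hke : k = a.toNat
      · have hne : ¬ ((a + 1) ≤ (k : Int) ∧ (k : Int) < a + 1 + (d : Nat)) := by omega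
        have hyes : a ≤ (k : Int) ∧ (k : Int) < a + ((d+1 : Nat) : Int) := by push_cast; omega
        rw [if_neg hne, if_pos hyes, List.getD_eq_getElem _ _ hk']
        have hEl : (s.set a.toNat v)[k]'hk' = v := by
          subst hke; exact List.getElem_set_self (by omega)
        have hkl : ((k : Int)) = a := by omega
        rw [hEl, hv, hkl]
        congr 1
        rw [← hkl]
        simp
      · have hgd : (s.set a.toNat v).getD k 0 = s.getD k 0 := by
          rw [List.getD_eq_getElem _ _ hk', List.getD_eq_getElem _ _ hk,
            List.getElem_set_ne (by omega)]
        have hiff : ((a + 1) ≤ (k : Int) ∧ (k : Int) < a + 1 + (d : Nat)) ↔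
            (a ≤ (k : Int) ∧ (k : Int) < a + ((d+1 : Nat) : Int)) := by
          push_cast
          omega
        rw [hgd]
        by_cases hc : (a + 1) ≤ (k : Int) ∧ (k : Int) < a + 1 + (d : Nat)
        · rw [if_pos hc, if_pos (hiff.mp hc)]
        · rw [if_neg hc, if_neg (fun h => hc (hiff.mpr h))]

theorem pv_rows_fold (n : Int) (hn : 0 < n) :
    ∀ (rows : List (List Int)) (s : List Int), (s.length : Int) = n →
    ∃ res, rows.foldl (fun s row =>
        (PySem.List.pyRange 0 n 1).foldl
          (fun s j => PySem.List.pySetD s j (PySem.List.pyGetD s j 0 + PySem.List.pyGetD row j 0)) s) s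
        = res ∧ res.length = s.length ∧
      ∀ k, k < s.length → res.getD k 0 = s.getD k 0 + pvColSum rows (k : Int) := by
  intro rows
  induction rows with
  | nil =>
    intro s hs
    exact ⟨s, rfl, rfl, fun k hk => by simp [pvColSum]⟩
  | cons row rows ih =>
    intro s hs
    have hn0 : (0 : Int) + ((n.toNat : Nat) : Int) = n := by omega
    obtain ⟨mid, hmid, hmidlen, hmidget⟩ :=
      pv_inner_fold row n.toNat 0 s (le_refl 0) (by omega)
    rw [hn0] at hmid
    obtain ⟨res, hres, hreslen, hresget⟩ := ih mid (by omega)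
    refine ⟨res, ?_, by omega, ?_⟩
    · rw [List.foldl_cons, hmid, hres]
    · intro k hk
      have hmk : mid.getD k 0 = s.getD k 0 + PySem.List.pyGetD row (k : Int) 0 := by
        rw [hmidget k hk, if_pos (by constructor <;> omega)]
      rw [hresget k (by omega), hmk, pvColSum]
      simp [pvColSum]
      ring

-- ===== VERDICT (by name: the statement is the Claim_ definition above) =====
theorem verificarColunas_spec : Claim_equal_verificarColunas := by
  intro A n _ hPre
  unfold Spec_verificarColunas
  by_cases hn : n ≤ 0
  · have h0 : n.toNat = 0 := by omega
    unfold verificarColunas verificarColunas_alt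
    simp [PySem.List.pyRange_one_eq_nil hn, h0, PySem.List.count_eq]
  · have hn' : 0 < n := by omega
    have hinner : ∀ j : Int,
        (PySem.List.pyRange 0 (A.length : Int)).foldl
          (fun soma i => soma + PySem.List.pyGetD (PySem.List.pyGetD A i []) j 0) 0
        = pvColSum A j := by
      intro j
      rw [PySem.List.foldl_pyRange_zero_pyGetD' A []
        (fun soma row => soma + PySem.List.pyGetD row j 0) 0, PySem.List.foldl_add]
      simp [pvColSum]
    obtain ⟨res, hres, hreslen, hresget⟩ :=
      pv_rows_fold n hn' A (List.replicate n.toNat 0) (by simp; omega)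
    have hresmap : res = (PySem.List.pyRange 0 n).map (fun j => pvColSum A j) := by
      apply List.ext_getElem
      · simp only [hreslen, List.length_replicate, List.length_map,
          PySem.List.length_pyRange_one]
        omega
      · intro k h1 h2
        have hkn : k < n.toNat := by
          have h := hreslen; simp only [List.length_replicate] at h; omega
        rw [← List.getD_eq_getElem res 0 h1,
          hresget k (by simpa using hkn), List.getElem_map,
          PySem.List.getElem_pyRange_one, List.getD_replicate _ hkn]
        simp
    have hA : verificarColunas A n
        = ((PySem.List.pyRange 0 n).countP (fun j => decide (pvColSum A j = 0)) : Int) := by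
      unfold verificarColunas
      rw [PySem.List.foldl_congr_mem _ _ (fun c j => if pvColSum A j = 0 then c + 1 else c) 0
          (fun acc x _ => by simp only [hinner x]),
        PySem.List.foldl_ite_add_one (fun j => pvColSum A j = 0)]
      simp
    have hB : verificarColunas_alt A n
        = ((PySem.List.pyRange 0 n).countP (fun j => decide (pvColSum A j = 0)) : Int) := by
      unfold verificarColunas_alt
      dsimp only
      rw [PySem.List.foldl_pyRange_zero_pyGetD' A []
          (fun sums row => (PySem.List.pyRange 0 n).foldl
            (fun s j => PySem.List.pySetD s j
              (PySem.List.pyGetD s j 0 + PySem.List.pyGetD row j 0)) sums)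
          (List.replicate n.toNat 0), hres, PySem.List.count_eq, hresmap,
        List.count_eq_countP, List.countP_map]
      congr 1
    rw [hA, hB]
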